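-- pv_equiv track=rewrite | github.com/eliottcassidy2000/math | 04-computation/knot_tournament_bridge_v2.py | ham_paths_digraph
-- ===== SOURCE A (Python) =====
-- from itertools import permutations, combinations
--
-- def ham_paths_digraph(D):
--     """Count Hamiltonian paths in a general digraph (may have missing arcs)."""
--     n = len(D)
--     count = 0
--     for perm in permutations(range(n)):
--         valid = True
--         for i in range(n-1):
--             if D[perm[i]][perm[i+1]] != 1:
--                 valid = False
--                 break
--         if valid:
--             count += 1
--     return count
-- ===== SOURCE B (Python) =====
-- def ham_paths_digraph(D):
--     """Count Hamiltonian paths via Held-Karp: memoized counts of paths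
--     with vertex set `mask` starting at `first` (O(2^n * n^2))."""
--     n = len(D)
--     if n == 0:
--         return 1
--     from functools import lru_cache
--
--     @lru_cache(maxsize=None)
--     def paths(mask, first):
--         # number of valid chains whose vertex set is `mask`, starting at `first`
--         if mask == 1 << first:
--             return 1
--         rest = mask ^ (1 << first)
--         total = 0
--         for u in range(n):
--             if rest >> u & 1 and D[first][u] == 1:
--                 total += paths(rest, u)
--         return total
--
--     full = (1 << n) - 1
--     return sum(paths(full, first) for first in range(n))
-- ===== Notes on version B (the rewrite author's own statement) =====
-- stated objective: faster
-- what changed: Replaces brute-force enumeration of all n! permutations with a memoized Held-Karp dynamic program over (vertex-subset, first-vertex) states that sums path counts.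
import Mathlib
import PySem

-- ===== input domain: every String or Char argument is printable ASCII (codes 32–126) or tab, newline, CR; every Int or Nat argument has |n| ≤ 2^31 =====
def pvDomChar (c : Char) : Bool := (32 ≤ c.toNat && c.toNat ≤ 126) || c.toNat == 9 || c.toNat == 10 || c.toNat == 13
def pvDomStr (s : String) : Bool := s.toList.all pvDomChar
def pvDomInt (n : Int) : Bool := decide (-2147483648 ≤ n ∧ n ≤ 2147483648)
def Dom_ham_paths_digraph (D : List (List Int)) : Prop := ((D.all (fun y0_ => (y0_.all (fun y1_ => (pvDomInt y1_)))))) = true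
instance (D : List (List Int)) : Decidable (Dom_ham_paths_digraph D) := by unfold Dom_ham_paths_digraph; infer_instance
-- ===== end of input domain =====

-- B replaces A's enumeration of all n! permutations by a Held-Karp subset DP; same return value on Pre_ (rows long enough for A's D[u][v] accesses).

-- ===== PORT A =====

-- adjacency lookup D[u][v] == 1 (indices in range on Pre_, so the defaults are never reached there)
def pvEdge (D : List (List Int)) (u v : Nat) : Bool := ((D.getD u []).getD v 0) == 1

-- itertools.permutations: pick each element as head, recurse on the rest
def pvPerms (l : List Nat) : List (List Nat) :=
  if h : l = [] then [[]]
  else l.attach.flatMap (fun x => (pvPerms (l.erase x.1)).map (x.1 :: ·))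
termination_by l.length
decreasing_by
  have h1 : (l.erase x.1).length = l.length - 1 := List.length_erase_of_mem x.2
  have h2 : 0 < l.length := List.length_pos_of_ne_nil h
  omega

-- A's inner loop: all consecutive entries equal 1 (break on first failure)
def pvValid (D : List (List Int)) : List Nat → Bool
  | u :: v :: rest => pvEdge D u v && pvValid D (v :: rest)
  | _ => true

def ham_paths_digraph (D : List (List Int)) : Int :=
  ((pvPerms (List.range D.length)).countP (pvValid D) : Int)

-- ===== PORT B =====

-- lemma pvHK's termination cites: clearing a set bit decreases the mask
theorem pvXorShiftLt {mask v : Nat} (h : mask.testBit v) : mask ^^^ (1 <<< v) < mask := by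
  apply Nat.lt_of_testBit v
  · simp [Nat.testBit_xor, h, Nat.one_shiftLeft]
  · exact h
  · intro j hj
    simp [Nat.testBit_xor, Nat.one_shiftLeft, Nat.ne_of_lt hj]

-- paths(mask, first): number of valid chains whose vertex set is `mask`, starting at `first`
def pvHK (D : List (List Int)) (n : Nat) (mask first : Nat) : Int :=
  if h : mask.testBit first then  -- totality guard: holds at every call the Python makes
    if mask = 1 <<< first then 1
    else
      (List.range n).foldl
        (fun acc u =>
          if (mask ^^^ (1 <<< first)).testBit u && pvEdge D first u then
            acc + pvHK D n (mask ^^^ (1 <<< first)) u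
          else acc) 0
  else 0
termination_by mask
decreasing_by exact pvXorShiftLt h

def ham_paths_digraph_alt (D : List (List Int)) : Int :=
  let n := D.length
  if n = 0 then 1
  else (List.range n).foldl (fun acc first => acc + pvHK D n ((1 <<< n) - 1) first) 0

-- ===== PRECONDITION & SPEC =====
-- Pre_: exactly the inputs on which A returns: A reads D[u][v] for every pair u ≠ v below n, and raises IndexError when some such row access is out of range.
def Pre_ham_paths_digraph (D : List (List Int)) : Prop :=
  ∀ i < D.length, ∀ j < D.length, i ≠ j → j < (D.getD i []).length
instance (D : List (List Int)) : Decidable (Pre_ham_paths_digraph D) := by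
  unfold Pre_ham_paths_digraph; infer_instance

def pvWitness_ham_paths_digraph : List (List Int) := [[0, 1], [1, 0]]

def Spec_ham_paths_digraph (D : List (List Int)) (out : Int) : Prop := out = ham_paths_digraph_alt D
instance (D : List (List Int)) (out : Int) : Decidable (Spec_ham_paths_digraph D out) := by unfold Spec_ham_paths_digraph; infer_instance

-- ===== CLAIM (what is proved, stated in full; the proofs are below) =====
def Claim_equal_ham_paths_digraph : Prop := ∀ (D : List (List Int)), Dom_ham_paths_digraph D → Pre_ham_paths_digraph D → Spec_ham_paths_digraph D (ham_paths_digraph D)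

-- ===== LEMMAS AND PROOFS =====

-- number of permutations p of rem such that v::p is a valid chain
def pvCnt (D : List (List Int)) (v : Nat) (rem : List Nat) : Int :=
  ((pvPerms rem).countP (fun p => pvValid D (v :: p)) : Int)

theorem pvPerms_nil : pvPerms [] = [[]] := by simp [pvPerms]

theorem pvPerms_ne (l : List Nat) (h : l ≠ []) :
    pvPerms l = l.attach.flatMap (fun x => (pvPerms (l.erase x.1)).map (x.1 :: ·)) := by
  rw [pvPerms]; simp [h]

theorem pvCountP_flatMap {α β : Type} (p : β → Bool) (l : List α) (f : α → List β) :
    (l.flatMap f).countP p = (l.map (fun x => (f x).countP p)).sum := by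
  induction l with
  | nil => simp
  | cons a t ih => simp [List.flatMap_cons, List.countP_append, ih]

theorem pvFoldlIf {α : Type} (f : α → Int) (c : α → Bool) :
    ∀ (l : List α) (init : Int),
      l.foldl (fun a u => if c u then a + f u else a) init
        = init + ((l.filter c).map f).sum := by
  intro l
  induction l with
  | nil => simp
  | cons a t ih =>
    intro init
    by_cases h : c a = true
    · simp [List.foldl_cons, h, ih, add_assoc]
    · simp only [Bool.not_eq_true] at h
      simp [List.foldl_cons, h, ih]

theorem pvFoldlAdd {α : Type} (f : α → Int) (l : List α) (init : Int) :
    l.foldl (fun a u => a + f u) init = init + (l.map f).sum := by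
  induction l generalizing init with
  | nil => simp
  | cons a t ih => simp [List.foldl_cons, ih, add_assoc]

theorem pvSum_attach {α : Type} (l : List α) (f : α → Int) :
    (l.attach.map (fun x => f x.1)).sum = (l.map f).sum := by
  rw [List.attach_map_val]

theorem pvSum_if {α : Type} (l : List α) (c : α → Bool) (f : α → Int) :
    (l.map (fun u => if c u then f u else 0)).sum = ((l.filter c).map f).sum := by
  induction l with
  | nil => simp
  | cons a t ih =>
    by_cases h : c a = true
    · simp [h, ih]
    · simp only [Bool.not_eq_true] at h
      simp [h, ih]

-- recursion satisfied by pvCnt on a nonempty list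
theorem pvCnt_rec (D : List (List Int)) (v : Nat) (rem : List Nat) (h : rem ≠ []) :
    pvCnt D v rem
      = ((rem.filter (fun u => pvEdge D v u)).map
          (fun u => pvCnt D u (rem.erase u))).sum := by
  unfold pvCnt
  rw [pvPerms_ne rem h, pvCountP_flatMap, Nat.cast_list_sum, List.map_map]
  have hstep : (rem.attach.map
        ((Nat.cast : Nat → Int) ∘
          (fun x => ((pvPerms (rem.erase x.1)).map (x.1 :: ·)).countP (fun p => pvValid D (v :: p)))))
      = rem.attach.map (fun x =>
          if pvEdge D v x.1 then pvCnt D x.1 (rem.erase x.1) else 0) := by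
    apply List.map_congr_left
    intro x _
    simp only [Function.comp]
    rw [List.countP_map]
    by_cases he : pvEdge D v x.1 = true
    · rw [if_pos he]
      unfold pvCnt
      congr 1
      apply List.countP_congr
      intro p _
      simp [Function.comp, pvValid, he]
    · simp only [Bool.not_eq_true] at he
      rw [if_neg (by simp [he])]
      rw [List.countP_eq_zero.mpr]
      · simp
      · intro p _
        simp [Function.comp, pvValid, he]
  rw [hstep, pvSum_attach rem (fun u => if pvEdge D v u then pvCnt D u (rem.erase u) else 0),
      pvSum_if]
  simp [pvCnt]

-- bits of mask ^^^ 2^v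
theorem pvTestBit_clear (mask v u : Nat) (hv : mask.testBit v) :
    (mask ^^^ (1 <<< v)).testBit u = (mask.testBit u && decide (u ≠ v)) := by
  by_cases h : u = v
  · subst h; simp [Nat.testBit_xor, Nat.one_shiftLeft, hv]
  · simp [Nat.testBit_xor, Nat.one_shiftLeft, h, Ne.symm h]

-- erasing from a filtered range = filtering with the extra condition
theorem pvEraseFilterRange (n v : Nat) (q : Nat → Bool) :
    ((List.range n).filter q).erase v
      = (List.range n).filter (fun u => q u && decide (u ≠ v)) := by
  rw [List.Nodup.erase_eq_filter (List.Nodup.filter _ List.nodup_range),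
      List.filter_filter]
  apply List.filter_congr
  intro u _
  by_cases h : q u = true <;> by_cases h2 : u = v <;> simp [h, h2]

theorem pvFilterNonempty (n m : Nat) (hm : m ≠ 0) (hlt : m < 2 ^ n) :
    (List.range n).filter (fun u => m.testBit u) ≠ [] := by
  intro hcontra
  apply hm
  apply Nat.eq_of_testBit_eq
  intro i
  rw [Nat.zero_testBit]
  by_cases hi : i < n
  · by_contra hbit
    simp only [Bool.not_eq_false] at hbit
    have : i ∈ (List.range n).filter (fun u => m.testBit u) := by
      simp [List.mem_filter, List.mem_range, hi, hbit]
    simp [hcontra] at this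
  · push_neg at hi
    exact Nat.testBit_eq_false_of_lt (Nat.lt_of_lt_of_le hlt (Nat.pow_le_pow_right (by omega) hi))

-- main invariant: pvHK D n mask v = number of valid chains starting at v over the other bits of mask
theorem pvHK_eq_cnt (D : List (List Int)) (n : Nat) :
    ∀ mask, mask < 2 ^ n → ∀ v, mask.testBit v →
      pvHK D n mask v
        = pvCnt D v ((List.range n).filter (fun u => (mask ^^^ (1 <<< v)).testBit u)) := by
  intro mask
  induction mask using Nat.strong_induction_on with
  | _ mask ih =>
    intro hmask v hv
    rw [pvHK]
    rw [dif_pos hv]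
    by_cases hbase : mask = 1 <<< v
    · rw [if_pos hbase, hbase, Nat.xor_self]
      have h0 : (List.range n).filter (fun u => Nat.testBit 0 u) = [] := by
        simp [Nat.zero_testBit]
      rw [h0]
      simp [pvCnt, pvPerms_nil, pvValid]
    · rw [if_neg hbase]
      have hrest_ne : mask ^^^ (1 <<< v) ≠ 0 := by
        intro h0
        apply hbase
        have := congrArg (fun x => x ^^^ (1 <<< v)) h0
        simpa [Nat.xor_assoc] using this
      have hrest_lt : mask ^^^ (1 <<< v) < mask := pvXorShiftLt hv
      have hrest_lt2 : mask ^^^ (1 <<< v) < 2 ^ n := lt_trans hrest_lt hmask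
      rw [pvCnt_rec D v _ (pvFilterNonempty n _ hrest_ne hrest_lt2)]
      rw [pvFoldlIf (fun u => pvHK D n (mask ^^^ (1 <<< v)) u)
            (fun u => (mask ^^^ (1 <<< v)).testBit u && pvEdge D v u)]
      rw [zero_add, List.filter_filter]
      have hcomm : (List.range n).filter (fun a => pvEdge D v a && (mask ^^^ (1 <<< v)).testBit a)
          = (List.range n).filter (fun a => (mask ^^^ (1 <<< v)).testBit a && pvEdge D v a) := by
        apply List.filter_congr
        intro w _
        exact Bool.and_comm _ _
      rw [hcomm]
      apply congrArg List.sum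
      apply List.map_congr_left
      intro u hu
      have hu' := List.mem_filter.mp hu
      have hbit : (mask ^^^ (1 <<< v)).testBit u := by
        have h2 := hu'.2
        simp only [Bool.and_eq_true] at h2
        exact h2.1
      rw [pvEraseFilterRange n u (fun w => (mask ^^^ (1 <<< v)).testBit w)]
      have hfe : (List.range n).filter
            (fun w => (mask ^^^ (1 <<< v)).testBit w && decide (w ≠ u))
          = (List.range n).filter (fun w => ((mask ^^^ (1 <<< v)) ^^^ (1 <<< u)).testBit w) := by
        apply List.filter_congr
        intro w _
        exact (pvTestBit_clear (mask ^^^ (1 <<< v)) u w hbit).symm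
      rw [hfe]
      exact ih (mask ^^^ (1 <<< v)) hrest_lt hrest_lt2 u hbit

theorem pvFullBit (n u : Nat) : ((1 <<< n) - 1).testBit u = decide (u < n) := by
  rw [Nat.one_shiftLeft, Nat.testBit_two_pow_sub_one]

theorem pvHam_eq (D : List (List Int)) : ham_paths_digraph D = ham_paths_digraph_alt D := by
  unfold ham_paths_digraph
  simp only [ham_paths_digraph_alt]
  by_cases hn : D.length = 0
  · rw [if_pos hn, hn]
    simp [pvPerms_nil, pvValid]
  · rw [if_neg hn]
    have hne : List.range D.length ≠ [] := by
      intro hc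
      exact hn (by simpa [List.range_eq_nil] using hc)
    rw [pvPerms_ne _ hne, pvCountP_flatMap, Nat.cast_list_sum, List.map_map]
    rw [pvFoldlAdd (fun first => pvHK D D.length ((1 <<< D.length) - 1) first), zero_add]
    have hfull_lt : (1 <<< D.length) - 1 < 2 ^ D.length := by
      rw [Nat.one_shiftLeft]
      exact Nat.sub_lt (Nat.two_pow_pos _) (by omega)
    have hstep : ((List.range D.length).attach.map
          ((Nat.cast : Nat → Int) ∘
            (fun x => ((pvPerms ((List.range D.length).erase x.1)).map (x.1 :: ·)).countP (pvValid D))))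
        = (List.range D.length).attach.map (fun x => pvCnt D x.1 ((List.range D.length).erase x.1)) := by
      apply List.map_congr_left
      intro x _
      simp only [Function.comp]
      rw [List.countP_map]
      unfold pvCnt
      rfl
    rw [hstep, pvSum_attach (List.range D.length)
          (fun v => pvCnt D v ((List.range D.length).erase v))]
    apply congrArg List.sum
    apply List.map_congr_left
    intro v hv
    have hvn : v < D.length := List.mem_range.mp hv
    have hfbit : ((1 <<< D.length) - 1).testBit v := by
      rw [pvFullBit]; simpa using hvn
    rw [pvHK_eq_cnt D D.length ((1 <<< D.length) - 1) hfull_lt v hfbit]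
    congr 1
    rw [List.Nodup.erase_eq_filter List.nodup_range]
    apply List.filter_congr
    intro u hu
    have hun : u < D.length := List.mem_range.mp hu
    rw [pvTestBit_clear _ _ _ hfbit, pvFullBit]
    by_cases h : u = v <;> simp [h, hun, bne]

-- ===== VERDICT (by name: the statement is the Claim_ definition above) =====
theorem ham_paths_digraph_spec : Claim_equal_ham_paths_digraph := by
  intro D _ _
  unfold Spec_ham_paths_digraph
  exact pvHam_eq D
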